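-- pv_equiv track=rewrite | github.com/snap-conifer/MachineLearning | douban/data.py | actor_and_type
-- ===== SOURCE A (Python) =====
-- def actor_and_type(json_list:list)->dict:
--         record = dict()
--         for j  in json_list:
--                 actor_str = j.get("actor")
--                 if not actor_str:
--                         continue
--                 actor_list = actor_str.split("/")
--                 type_str = j.get("type")
--                 if not type_str:
--                         continue
--                 type_list = type_str.split("/")
--                 for actor in actor_list:
--                         if actor not in record:
--                                 record[actor] = dict()
--                         for type in type_list:
--                                 if type not  in record[actor]:
--                                         record[actor][type] = 0
--                                 record[actor][type] += 1
--         return record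
-- ===== SOURCE B (Python) =====
-- def actor_and_type(json_list: list) -> dict:
--     # One pass: count (actor, type) co-occurrences in a flat dict keyed by pairs,
--     # then a second reshaping pass builds the nested dict.
--     cnt = {}
--     for j in json_list:
--         actor_str = j.get("actor")
--         type_str = j.get("type")
--         if not actor_str or not type_str:
--             continue
--         for actor in actor_str.split("/"):
--             for typ in type_str.split("/"):
--                 key = (actor, typ)
--                 cnt[key] = cnt.get(key, 0) + 1
--     record = {}
--     for (actor, typ), n in cnt.items():
--         record.setdefault(actor, {})[typ] = n
--     return record
-- ===== Notes on version B (the rewrite author's own statement) =====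
-- stated objective: alternative
-- what changed: B replaces A's on-the-fly nested dict-of-dicts counting by a single flat counter keyed by (actor, type) pairs plus a separate reshaping pass that builds the nested dict from the counter's items.
import Mathlib
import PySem

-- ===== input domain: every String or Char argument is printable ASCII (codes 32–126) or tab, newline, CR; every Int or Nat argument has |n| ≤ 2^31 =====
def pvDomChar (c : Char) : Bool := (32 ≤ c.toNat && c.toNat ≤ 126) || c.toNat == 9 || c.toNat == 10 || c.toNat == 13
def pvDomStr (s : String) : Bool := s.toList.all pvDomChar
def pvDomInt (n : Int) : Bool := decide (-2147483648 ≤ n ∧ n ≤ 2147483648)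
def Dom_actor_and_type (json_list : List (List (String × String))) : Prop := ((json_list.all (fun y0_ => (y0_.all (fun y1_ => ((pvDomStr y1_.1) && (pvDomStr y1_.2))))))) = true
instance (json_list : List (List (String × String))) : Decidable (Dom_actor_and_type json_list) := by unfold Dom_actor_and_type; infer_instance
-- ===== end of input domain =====

-- B replaces A's nested-dict counting by a flat (actor, type)-keyed counter plus a separate reshape pass (alternative decomposition, same cost).

-- ===== PORT A =====
def actor_and_type (json_list : List (List (String × String))) : List (String × List (String × Int)) :=
  let record : PySem.Dict String (PySem.Dict String Int) :=
    json_list.foldl (fun record j =>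
      match (PySem.Dict.mk j).get? "actor" with
      | none => record                                   -- if not actor_str: continue (missing key)
      | some actor_str =>
        if actor_str = "" then record                    -- if not actor_str: continue (empty string)
        else
          let actor_list := (PySem.Str.split? actor_str "/").getD []   -- sep "/" ≠ "": split? is never none
          match (PySem.Dict.mk j).get? "type" with
          | none => record
          | some type_str =>
            if type_str = "" then record
            else
              let type_list := (PySem.Str.split? type_str "/").getD []
              actor_list.foldl (fun record actor =>
                let record := if record.contains actor then record else record.insert actor PySem.Dict.empty
                type_list.foldl (fun record ty =>
                  record.modify actor PySem.Dict.empty (fun inner => inner.modify ty 0 (· + 1))) record)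
                record)
      PySem.Dict.empty
  record.items.map (fun p => (p.1, p.2.items))

-- ===== PORT B =====
def actor_and_type_alt (json_list : List (List (String × String))) : List (String × List (String × Int)) :=
  let cnt : PySem.Dict (String × String) Int :=
    json_list.foldl (fun cnt j =>
      match (PySem.Dict.mk j).get? "actor", (PySem.Dict.mk j).get? "type" with
      | some actor_str, some type_str =>
        if actor_str = "" ∨ type_str = "" then cnt       -- if not actor_str or not type_str: continue
        else
          ((PySem.Str.split? actor_str "/").getD []).foldl (fun cnt actor =>
            ((PySem.Str.split? type_str "/").getD []).foldl (fun cnt ty =>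
              cnt.insert (actor, ty) (cnt.getD (actor, ty) 0 + 1)) cnt)
            cnt
      | _, _ => cnt) PySem.Dict.empty
  let record : PySem.Dict String (PySem.Dict String Int) :=
    cnt.items.foldl (fun record q =>
      -- record.setdefault(actor, {})[typ] = n : store get(actor, {}) extended with typ ↦ n, keeping actor's position
      record.modify q.1.1 PySem.Dict.empty (fun inner => inner.insert q.1.2 q.2))
      PySem.Dict.empty
  record.items.map (fun p => (p.1, p.2.items))

-- ===== PRECONDITION & SPEC =====
def Spec_actor_and_type (json_list : List (List (String × String))) (out : List (String × List (String × Int))) : Prop := out = actor_and_type_alt json_list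
instance (json_list : List (List (String × String))) (out : List (String × List (String × Int))) : Decidable (Spec_actor_and_type json_list out) := by unfold Spec_actor_and_type; infer_instance

-- ===== CLAIM (what is proved, stated in full; the proofs are below) =====
def Claim_equal_actor_and_type : Prop := ∀ (json_list : List (List (String × String))), Dom_actor_and_type json_list → Spec_actor_and_type json_list (actor_and_type json_list)

-- ===== LEMMAS AND PROOFS =====

-- the flat list of (actor, type) occurrences contributed by one record
def recPairs (j : List (String × String)) : List (String × String) :=
  match (PySem.Dict.mk j).get? "actor" with
  | none => []
  | some actor_str =>
    if actor_str = "" then []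
    else
      match (PySem.Dict.mk j).get? "type" with
      | none => []
      | some type_str =>
        if type_str = "" then []
        else
          ((PySem.Str.split? actor_str "/").getD []).flatMap (fun actor =>
            ((PySem.Str.split? type_str "/").getD []).map (fun ty => (actor, ty)))

def allPairs (json_list : List (List (String × String))) : List (String × String) :=
  json_list.flatMap recPairs

-- A's elementary update for one (actor, type) occurrence
def modStep (r : PySem.Dict String (PySem.Dict String Int)) (p : String × String) : PySem.Dict String (PySem.Dict String Int) :=
  r.modify p.1 PySem.Dict.empty (fun inner => inner.modify p.2 0 (· + 1))

lemma splitOn_go_ne_nil (sep : List Char) :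
    ∀ (fuel : Nat) (l cur : List Char) (acc : List (List Char)),
      PySem.Chars.splitOn.go sep fuel l cur acc ≠ [] := by
  intro fuel
  induction fuel with
  | zero =>
    intro l cur acc
    simp [PySem.Chars.splitOn.go]
  | succ n ih =>
    intro l cur acc
    cases l with
    | nil => simp [PySem.Chars.splitOn.go]
    | cons c rest =>
      rw [PySem.Chars.splitOn.go]
      split
      · exact ih _ _ _
      · exact ih _ _ _

lemma splitD_ne_nil (s : String) : (PySem.Str.split? s "/").getD [] ≠ [] := by
  have h := PySem.Str.split?_map s "/"
  simp only [PySem.Chars.split?] at h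
  have hne : "/".toList.isEmpty = false := rfl
  rw [hne] at h
  simp only [Bool.false_eq_true, if_false] at h
  cases hs : PySem.Str.split? s "/" with
  | none => rw [hs] at h; simp at h
  | some xs =>
    rw [hs] at h
    simp only [Option.map_some] at h
    intro hx
    have hxs : xs = [] := by simpa using hx
    rw [hxs] at h
    have hg := splitOn_go_ne_nil "/".toList (s.toList.length + 1) s.toList [] []
    rw [PySem.Chars.splitOn] at h
    injection h with h'
    exact hg (by simpa using h'.symm)

-- a no-op 'if actor not in record' guard followed by at least one write at actor is absorbed by modify
lemma absorb (ts : List String) (hts : ts ≠ []) (a : String) (r : PySem.Dict String (PySem.Dict String Int)) :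
    ts.foldl (fun record ty =>
        record.modify a PySem.Dict.empty (fun inner => inner.modify ty 0 (· + 1)))
      (if r.contains a then r else r.insert a PySem.Dict.empty)
    = ts.foldl (fun record ty =>
        record.modify a PySem.Dict.empty (fun inner => inner.modify ty 0 (· + 1))) r := by
  cases ts with
  | nil => exact absurd rfl hts
  | cons t ts =>
    simp only [List.foldl_cons]
    congr 1
    by_cases hc : r.contains a
    · rw [if_pos hc]
    · rw [if_neg hc]
      have hget : r.getD a PySem.Dict.empty = PySem.Dict.empty := by
        rw [PySem.Dict.getD, (PySem.Dict.get?_eq_none_iff_contains r a).2 (Bool.not_eq_true _ ▸ hc)]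
        rfl
      simp only [PySem.Dict.modify, PySem.Dict.getD_insert_self, PySem.Dict.insert_insert_self, hget]

-- generic: looking up key a after a modify-at-key loop is a loop over the entries with key a
lemma getD_foldl_modify_filter {κ ν β : Type} [BEq κ] [LawfulBEq κ] [DecidableEq κ]
    (l : List β) (key : β → κ) (d0 : ν) (g : ν → β → ν) (d : PySem.Dict κ ν) (a : κ) :
    (l.foldl (fun r x => r.modify (key x) d0 (fun i => g i x)) d).getD a d0
    = (l.filter (fun x => key x == a)).foldl g (d.getD a d0) := by
  induction l generalizing d with
  | nil => rfl
  | cons x l ih =>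
    simp only [List.foldl_cons, List.filter_cons, ih]
    by_cases h : key x = a
    · simp only [h, beq_self_eq_true, if_pos trivial, List.foldl_cons]
      rw [← h, PySem.Dict.getD_modify_self]
    · have hb : (key x == a) = false := by simp [h]
      rw [hb]
      simp only [Bool.false_eq_true, if_false]
      rw [PySem.Dict.getD_modify]
      rw [if_neg (Ne.symm h)]

lemma ofList_append_singleton {α : Type} [BEq α] [LawfulBEq α] (l : List α) (x : α) :
    PySem.Set.ofList (l ++ [x]) = PySem.Set.add (PySem.Set.ofList l) x := by
  simp [PySem.Set.ofList, List.foldl_append]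

lemma ofList_map_ofList {α β : Type} [BEq α] [LawfulBEq α] [BEq β] [LawfulBEq β] (l : List α) (f : α → β) :
    PySem.Set.ofList ((PySem.Set.ofList l).map f) = PySem.Set.ofList (l.map f) := by
  induction l using List.reverseRecOn with
  | nil => rfl
  | append_singleton l x ih =>
    rw [ofList_append_singleton, PySem.Set.add_eq_ite]
    by_cases hx : x ∈ PySem.Set.ofList l
    · rw [if_pos hx, ih, List.map_append, List.map_cons, List.map_nil, ofList_append_singleton,
        PySem.Set.add_of_mem]
      rw [PySem.Set.mem_ofList]
      exact List.mem_map_of_mem (by rwa [PySem.Set.mem_ofList] at hx)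
    · rw [if_neg hx]
      have h1 : List.map f (PySem.Set.ofList l ++ [x]) = List.map f (PySem.Set.ofList l) ++ [f x] := by simp
      have h2 : List.map f (l ++ [x]) = List.map f l ++ [f x] := by simp
      rw [h1, h2, ofList_append_singleton, ofList_append_singleton, PySem.Set.add_eq_ite,
        PySem.Set.add_eq_ite, ih]

lemma filter_ofList {α : Type} [BEq α] [LawfulBEq α] (l : List α) (p : α → Bool) :
    (PySem.Set.ofList l).filter p = PySem.Set.ofList (l.filter p) := by
  induction l using List.reverseRecOn with
  | nil => rfl
  | append_singleton l x ih =>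
    rw [ofList_append_singleton, PySem.Set.add_eq_ite, List.filter_append]
    by_cases hx : x ∈ PySem.Set.ofList l
    · rw [if_pos hx, ih]
      by_cases hp : p x
      · have hmem : x ∈ l.filter p := List.mem_filter.2 ⟨(PySem.Set.mem_ofList _ _).1 hx, hp⟩
        simp [hp, ofList_append_singleton, PySem.Set.add_of_mem, (PySem.Set.mem_ofList _ _).2 hmem]
      · simp [hp]
    · rw [if_neg hx, List.filter_append, ih]
      by_cases hp : p x
      · have hmem : x ∉ List.filter p l := fun h => hx ((PySem.Set.mem_ofList _ _).2 (List.mem_filter.1 h).1)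
        rw [(by simp [hp] : List.filter p [x] = [x]), ofList_append_singleton,
          PySem.Set.add_of_not_mem (by rw [PySem.Set.mem_ofList]; intro h; exact hmem h)]
      · simp [hp]

lemma map_ofList_injOn {α β : Type} [BEq α] [LawfulBEq α] [BEq β] [LawfulBEq β] (l : List α) (f : α → β)
    (hinj : ∀ x ∈ l, ∀ y ∈ l, f x = f y → x = y) :
    (PySem.Set.ofList l).map f = PySem.Set.ofList (l.map f) := by
  induction l using List.reverseRecOn with
  | nil => rfl
  | append_singleton l x ih =>
    have hinj' : ∀ x ∈ l, ∀ y ∈ l, f x = f y → x = y := fun a ha b hb =>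
      hinj a (List.mem_append_left _ ha) b (List.mem_append_left _ hb)
    rw [ofList_append_singleton, PySem.Set.add_eq_ite,
      (by simp : List.map f (l ++ [x]) = List.map f l ++ [f x]), ofList_append_singleton,
      PySem.Set.add_eq_ite]
    by_cases hx : x ∈ PySem.Set.ofList l
    · have hmem : f x ∈ PySem.Set.ofList (l.map f) := by
        rw [PySem.Set.mem_ofList]
        exact List.mem_map_of_mem ((PySem.Set.mem_ofList _ _).1 hx)
      rw [if_pos hx, if_pos hmem, ih hinj']
    · have hmem : f x ∉ PySem.Set.ofList (l.map f) := by
        rw [PySem.Set.mem_ofList]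
        intro h
        obtain ⟨y, hy, hfy⟩ := List.mem_map.1 h
        exact hx ((PySem.Set.mem_ofList _ _).2 (hinj y (List.mem_append_left _ hy) x (by simp) hfy ▸ hy))
      rw [if_neg hx, if_neg hmem, List.map_append, List.map_cons, List.map_nil, ih hinj']

lemma count_snd_filter (l : List (String × String)) (a t : String) :
    ((l.filter (fun p => p.1 == a)).map Prod.snd).count t = l.count (a, t) := by
  induction l with
  | nil => rfl
  | cons p l ih =>
    by_cases h1 : p.1 = a
    · by_cases h2 : p.2 = t
      · have hp : p = (a, t) := Prod.ext h1 h2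
        simp [hp, ih]
      · simp [h1, h2, ih, Prod.ext_iff]
    · simp [h1, ih, Prod.ext_iff]

lemma recordA_eq (json_list : List (List (String × String))) :
    (json_list.foldl (fun record j =>
      match (PySem.Dict.mk j).get? "actor" with
      | none => record
      | some actor_str =>
        if actor_str = "" then record
        else
          let actor_list := (PySem.Str.split? actor_str "/").getD []
          match (PySem.Dict.mk j).get? "type" with
          | none => record
          | some type_str =>
            if type_str = "" then record
            else
              let type_list := (PySem.Str.split? type_str "/").getD []
              actor_list.foldl (fun record actor =>
                let record := if record.contains actor then record else record.insert actor PySem.Dict.empty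
                type_list.foldl (fun record ty =>
                  record.modify actor PySem.Dict.empty (fun inner => inner.modify ty 0 (· + 1))) record)
                record)
      (PySem.Dict.empty : PySem.Dict String (PySem.Dict String Int)))
    = (allPairs json_list).foldl modStep PySem.Dict.empty := by
  rw [allPairs, List.foldl_flatMap]
  congr 1
  funext r j
  rw [recPairs]
  cases ha : (PySem.Dict.mk j).get? "actor" with
  | none => rfl
  | some actor_str =>
    simp only []
    by_cases he : actor_str = ""
    · simp [he]
    · rw [if_neg he, if_neg he]
      cases ht : (PySem.Dict.mk j).get? "type" with
      | none => rfl
      | some type_str =>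
        simp only []
        by_cases he2 : type_str = ""
        · simp [he2]
        · rw [if_neg he2, if_neg he2, List.foldl_flatMap]
          congr 1
          funext racc actor
          rw [List.foldl_map]
          exact absorb _ (splitD_ne_nil type_str) actor racc

lemma cntB_eq (json_list : List (List (String × String))) :
    (json_list.foldl (fun cnt j =>
      match (PySem.Dict.mk j).get? "actor", (PySem.Dict.mk j).get? "type" with
      | some actor_str, some type_str =>
        if actor_str = "" ∨ type_str = "" then cnt
        else
          ((PySem.Str.split? actor_str "/").getD []).foldl (fun cnt actor =>
            ((PySem.Str.split? type_str "/").getD []).foldl (fun cnt ty =>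
              cnt.insert (actor, ty) (cnt.getD (actor, ty) 0 + 1)) cnt)
            cnt
      | _, _ => cnt) (PySem.Dict.empty : PySem.Dict (String × String) Int))
    = PySem.Dict.counter (allPairs json_list) := by
  rw [← PySem.Dict.foldl_insert_getD_add_one_eq_counter, allPairs, List.foldl_flatMap]
  congr 1
  funext c j
  rw [recPairs]
  cases ha : (PySem.Dict.mk j).get? "actor" with
  | none => rfl
  | some actor_str =>
    cases ht : (PySem.Dict.mk j).get? "type" with
    | none => simp
    | some type_str =>
      simp only []
      by_cases he : actor_str = ""
      · simp [he]
      · by_cases he2 : type_str = ""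
        · simp [he2]
        · rw [if_neg (by simp [he, he2]), if_neg he, if_neg he2, List.foldl_flatMap]
          congr 1
          funext cacc actor
          rw [List.foldl_map]

def shapePairs (l : List (String × String)) : List (String × List (String × Int)) :=
  (PySem.Set.ofList (l.map Prod.fst)).map (fun a =>
    (a, (PySem.Set.ofList ((l.filter (fun p => p.1 == a)).map Prod.snd)).map
      (fun t => (t, (((l.filter (fun p => p.1 == a)).map Prod.snd).count t : Int)))))

lemma update_nil_eq_ofList {α : Type} [BEq α] (m : List α) : PySem.Set.update [] m = PySem.Set.ofList m := rfl

lemma snd_injOn_filter (l : List (String × String)) (a : String) :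
    ∀ x ∈ l.filter (fun p => p.1 == a), ∀ y ∈ l.filter (fun p => p.1 == a),
      Prod.snd x = Prod.snd y → x = y := by
  intro x hx y hy hs
  have hx1 : x.1 = a := by simpa using (List.mem_filter.1 hx).2
  have hy1 : y.1 = a := by simpa using (List.mem_filter.1 hy).2
  exact Prod.ext (hx1.trans hy1.symm) hs

lemma outA (l : List (String × String)) :
    ((l.foldl modStep PySem.Dict.empty).items.map (fun p => (p.1, p.2.items))) = shapePairs l := by
  have hstep : modStep = fun (r : PySem.Dict String (PySem.Dict String Int)) (p : String × String) =>
      r.modify p.1 PySem.Dict.empty (fun i => i.modify p.2 0 (· + 1)) := rfl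
  rw [hstep]
  have hnodup : (l.foldl (fun (r : PySem.Dict String (PySem.Dict String Int)) (p : String × String) =>
      r.modify p.1 PySem.Dict.empty (fun i => i.modify p.2 0 (· + 1))) PySem.Dict.empty).keys.Nodup := by
    exact PySem.Dict.nodup_keys_foldl_modify_key l Prod.fst PySem.Dict.empty
      (fun _ p => fun i => i.modify p.2 0 (· + 1)) PySem.Dict.empty (by simp [PySem.Dict.keys_empty])
  have hkeys : (l.foldl (fun (r : PySem.Dict String (PySem.Dict String Int)) (p : String × String) =>
      r.modify p.1 PySem.Dict.empty (fun i => i.modify p.2 0 (· + 1))) PySem.Dict.empty).keys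
      = PySem.Set.ofList (l.map Prod.fst) := by
    rw [PySem.Dict.keys_foldl_modify_key l Prod.fst PySem.Dict.empty
      (fun _ p => fun i => i.modify p.2 0 (· + 1)) PySem.Dict.empty]
    simp [PySem.Dict.keys_empty, update_nil_eq_ofList]
  have hget : ∀ a, (l.foldl (fun (r : PySem.Dict String (PySem.Dict String Int)) (p : String × String) =>
      r.modify p.1 PySem.Dict.empty (fun i => i.modify p.2 0 (· + 1))) PySem.Dict.empty).getD a PySem.Dict.empty
      = PySem.Dict.counter ((l.filter (fun p => p.1 == a)).map Prod.snd) := by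
    intro a
    rw [getD_foldl_modify_filter l Prod.fst PySem.Dict.empty
      (fun i p => i.modify p.2 0 (· + 1)) PySem.Dict.empty a]
    rw [PySem.Dict.counter_eq_foldl, List.foldl_map]
    simp [PySem.Dict.getD_empty]
  rw [PySem.Dict.items_eq_map_keys _ hnodup PySem.Dict.empty, hkeys, List.map_map, shapePairs]
  refine List.map_congr_left ?_
  intro a ha
  simp only [Function.comp]
  rw [hget a, PySem.Dict.items_counter]

lemma outB (l : List (String × String)) :
    (((PySem.Dict.counter l).items.foldl (fun record (q : (String × String) × Int) =>
        record.modify q.1.1 PySem.Dict.empty (fun inner => inner.insert q.1.2 q.2))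
      (PySem.Dict.empty : PySem.Dict String (PySem.Dict String Int))).items.map
        (fun p => (p.1, p.2.items))) = shapePairs l := by
  have hnodup : ((PySem.Dict.counter l).items.foldl (fun record (q : (String × String) × Int) =>
      record.modify q.1.1 PySem.Dict.empty (fun inner => inner.insert q.1.2 q.2))
      (PySem.Dict.empty : PySem.Dict String (PySem.Dict String Int))).keys.Nodup :=
    PySem.Dict.nodup_keys_foldl_modify_key (PySem.Dict.counter l).items
      (fun (q : (String × String) × Int) => q.1.1) PySem.Dict.empty
      (fun _ (q : (String × String) × Int) => fun inner => inner.insert q.1.2 q.2) PySem.Dict.empty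
      (by simp [PySem.Dict.keys_empty])
  have hkeys : ((PySem.Dict.counter l).items.foldl (fun record (q : (String × String) × Int) =>
      record.modify q.1.1 PySem.Dict.empty (fun inner => inner.insert q.1.2 q.2))
      (PySem.Dict.empty : PySem.Dict String (PySem.Dict String Int))).keys
      = PySem.Set.ofList (l.map Prod.fst) := by
    rw [PySem.Dict.keys_foldl_modify_key (PySem.Dict.counter l).items
      (fun (q : (String × String) × Int) => q.1.1) PySem.Dict.empty
      (fun _ (q : (String × String) × Int) => fun inner => inner.insert q.1.2 q.2) PySem.Dict.empty]
    rw [PySem.Dict.keys_empty, update_nil_eq_ofList, PySem.Dict.items_counter, List.map_map]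
    have hcomp : ((fun (q : (String × String) × Int) => q.1.1) ∘ fun k => (k, (l.count k : Int)))
        = Prod.fst := rfl
    rw [hcomp, ofList_map_ofList]
  have hfilter : ∀ a : String, (PySem.Dict.counter l).items.filter (fun q => q.1.1 == a)
      = (PySem.Set.ofList (l.filter (fun p => p.1 == a))).map (fun k => (k, (l.count k : Int))) := by
    intro a
    rw [PySem.Dict.items_counter, List.filter_map]
    have hcomp : ((fun (q : (String × String) × Int) => q.1.1 == a) ∘ fun k => (k, (l.count k : Int)))
        = fun k => k.1 == a := rfl
    rw [hcomp, filter_ofList]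
  have hget : ∀ a : String, ((PySem.Dict.counter l).items.foldl (fun record (q : (String × String) × Int) =>
      record.modify q.1.1 PySem.Dict.empty (fun inner => inner.insert q.1.2 q.2))
      (PySem.Dict.empty : PySem.Dict String (PySem.Dict String Int))).getD a PySem.Dict.empty
      = (((PySem.Dict.counter l).items.filter (fun q => q.1.1 == a)).foldl
          (fun inner q => inner.insert q.1.2 q.2) PySem.Dict.empty) := by
    intro a
    rw [getD_foldl_modify_filter (PySem.Dict.counter l).items
      (fun (q : (String × String) × Int) => q.1.1) PySem.Dict.empty
      (fun inner (q : (String × String) × Int) => inner.insert q.1.2 q.2) PySem.Dict.empty a,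
      PySem.Dict.getD_empty]
  rw [PySem.Dict.items_eq_map_keys _ hnodup PySem.Dict.empty, hkeys, List.map_map, shapePairs]
  refine List.map_congr_left ?_
  intro a ha
  simp only [Function.comp]
  rw [hget a, hfilter a, List.foldl_map]
  have hitems : ((PySem.Set.ofList (l.filter (fun p => p.1 == a))).foldl
      (fun (inner : PySem.Dict String Int) k => inner.insert k.2 (l.count k : Int)) PySem.Dict.empty).items
      = (PySem.Set.ofList (l.filter (fun p => p.1 == a))).map (fun k => (k.2, (l.count k : Int))) := by
    rw [PySem.Dict.items_foldl_insert_fresh (PySem.Set.ofList (l.filter (fun p => p.1 == a)))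
      (fun (k : String × String) => k.2) (fun k => (l.count k : Int)) PySem.Dict.empty
      (fun _ _ => PySem.Dict.contains_empty _)
      (by rw [map_ofList_injOn (l.filter (fun p => p.1 == a)) Prod.snd (snd_injOn_filter l a)]
          exact PySem.Set.nodup_ofList _)]
    rfl
  rw [hitems]
  rw [← map_ofList_injOn (l.filter (fun p => p.1 == a)) Prod.snd (snd_injOn_filter l a), List.map_map]
  refine congrArg (Prod.mk a) (List.map_congr_left ?_)
  intro k hk
  have hk1 : k.1 = a := by
    have hm := (List.mem_filter.1 ((PySem.Set.mem_ofList _ _).1 hk)).2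
    simpa using hm
  simp only [Function.comp]
  rw [count_snd_filter l a k.2, ← hk1]

-- ===== VERDICT (by name: the statement is the Claim_ definition above) =====
theorem actor_and_type_spec : Claim_equal_actor_and_type := by
  intro json_list _
  unfold Spec_actor_and_type
  simp only [actor_and_type, actor_and_type_alt]
  rw [recordA_eq, cntB_eq, outA, outB]
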